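-- pv_equiv track=rewrite | github.com/lorevox-hx/hornelore | scripts/archive/dump_cases_per_narrator.py | _fmt_truth_zones
-- ===== SOURCE A (Python) =====
-- from collections import defaultdict
-- from typing import Any, Dict, List
--
-- def _fmt_truth_zones(tz: Dict[str, Any]) -> str:
--     if not tz:
--         return "_none_"
--     buckets = defaultdict(list)
--     for path, z in tz.items():
--         zone = (z or {}).get("zone", "?")
--         expected = (z or {}).get("expected")
--         note = (z or {}).get("note")
--         tag = path
--         if expected:
--             tag += f' = "{expected}"'
--         if note:
--             tag += f"  _({note})_"
--         buckets[zone].append(tag)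
--     lines = []
--     for zone in ("must_extract", "may_extract", "should_ignore", "must_not_write"):
--         if zone in buckets:
--             lines.append(f"- **{zone}**")
--             for item in buckets[zone]:
--                 lines.append(f"    - `{item}`")
--     # Any zones we didn't explicitly list
--     for zone, items in buckets.items():
--         if zone in ("must_extract", "may_extract", "should_ignore", "must_not_write"):
--             continue
--         lines.append(f"- **{zone}**")
--         for item in items:
--             lines.append(f"    - `{item}`")
--     return "\n".join(lines) if lines else "_none_"
-- ===== SOURCE B (Python) =====
-- KNOWN = ("must_extract", "may_extract", "should_ignore", "must_not_write")
--
--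
-- def _tag(path, z):
--     z = z or {}
--     tag = path
--     expected = z.get("expected")
--     note = z.get("note")
--     if expected:
--         tag += f' = "{expected}"'
--     if note:
--         tag += f"  _({note})_"
--     return tag
--
--
-- def _fmt_truth_zones(tz):
--     if not tz:
--         return "_none_"
--     seen = list(dict.fromkeys((z or {}).get("zone", "?") for z in tz.values()))
--     order = [k for k in KNOWN if k in seen] + [k for k in seen if k not in KNOWN]
--     lines = []
--     for zone in order:
--         lines.append(f"- **{zone}**")
--         lines.extend(f"    - `{_tag(p, z)}`"
--                      for p, z in tz.items()
--                      if (z or {}).get("zone", "?") == zone)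
--     return "\n".join(lines)
-- ===== Notes on version B (the rewrite author's own statement) =====
-- stated objective: alternative
-- what changed: B replaces A's single defaultdict bucket-building pass (then two emission loops over the buckets) by first computing the zone emission order (known zones that occur in fixed order, then leftover zones via ordered dedup) and then re-scanning the entries once per zone to emit each block.
import Mathlib
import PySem

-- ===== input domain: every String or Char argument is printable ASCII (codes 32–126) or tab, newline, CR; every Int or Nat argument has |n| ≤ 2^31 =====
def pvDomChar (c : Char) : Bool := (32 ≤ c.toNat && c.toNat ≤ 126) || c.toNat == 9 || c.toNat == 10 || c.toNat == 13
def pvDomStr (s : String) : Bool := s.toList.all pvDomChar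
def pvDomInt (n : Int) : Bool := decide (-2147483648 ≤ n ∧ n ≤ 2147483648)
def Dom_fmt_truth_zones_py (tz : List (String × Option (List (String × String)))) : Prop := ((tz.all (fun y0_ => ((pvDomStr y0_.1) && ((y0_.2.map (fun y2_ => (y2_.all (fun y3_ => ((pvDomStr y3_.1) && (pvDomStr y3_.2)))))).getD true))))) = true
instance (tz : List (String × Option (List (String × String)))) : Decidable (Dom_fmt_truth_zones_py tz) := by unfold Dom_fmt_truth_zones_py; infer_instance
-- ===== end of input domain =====

-- B replaces A's single bucket-building pass by computing the zone emission order first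
-- (known zones that occur, then leftover zones in first-appearance order) and re-scanning
-- the entries per zone; objective: alternative decomposition, same output.

-- ===== PORT A =====
-- dict.get on the inner dict: first-match association-list lookup (per the type convention)
def pvGetA (m : List (String × String)) (k : String) : Option String :=
  (m.find? (fun p => p.1 == k)).map (·.2)

def pvKnownA : List String := ["must_extract", "may_extract", "should_ignore", "must_not_write"]

def fmt_truth_zones_py (tz : List (String × Option (List (String × String)))) : String :=
  if tz = [] then "_none_" else
  -- buckets = defaultdict(list); for path, z in tz.items(): … buckets[zone].append(tag)
  let buckets : PySem.Dict String (List String) :=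
    tz.foldl (fun d pz =>
      let m := pz.2.getD []                                -- (z or {})
      let zone := (pvGetA m "zone").getD "?"
      let expected := pvGetA m "expected"
      let note := pvGetA m "note"
      let tag := pz.1
      let tag := if (expected.getD "") ≠ "" then tag ++ " = \"" ++ expected.getD "" ++ "\"" else tag
      let tag := if (note.getD "") ≠ "" then tag ++ "  _(" ++ note.getD "" ++ ")_" else tag
      d.modify zone [] (fun xs => xs ++ [tag])) PySem.Dict.empty
  -- for zone in ("must_extract", …): if zone in buckets: header + items
  let lines : List String :=
    pvKnownA.foldl (fun acc zone =>
      if buckets.contains zone then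
        acc ++ (["- **" ++ zone ++ "**"] ++
          (buckets.getD zone []).map (fun item => "    - `" ++ item ++ "`"))
      else acc) []
  -- for zone, items in buckets.items(): skip the known ones, emit the rest
  let lines :=
    buckets.items.foldl (fun acc zi =>
      if pvKnownA.contains zi.1 then acc
      else acc ++ (["- **" ++ zi.1 ++ "**"] ++
        zi.2.map (fun item => "    - `" ++ item ++ "`"))) lines
  if lines = [] then "_none_" else PySem.Str.join "\n" lines

-- ===== PORT B =====
def pvGetB (m : List (String × String)) (k : String) : Option String :=
  (m.find? (fun p => p.1 == k)).map (·.2)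

def pvKnownB : List String := ["must_extract", "may_extract", "should_ignore", "must_not_write"]

def pvZoneB (z : Option (List (String × String))) : String :=
  (pvGetB (z.getD []) "zone").getD "?"

def pvTagB (path : String) (z : Option (List (String × String))) : String :=
  let m := z.getD []
  let expected := pvGetB m "expected"
  let note := pvGetB m "note"
  let tag := path
  let tag := if (expected.getD "") ≠ "" then tag ++ " = \"" ++ expected.getD "" ++ "\"" else tag
  if (note.getD "") ≠ "" then tag ++ "  _(" ++ note.getD "" ++ ")_" else tag

def fmt_truth_zones_py_alt (tz : List (String × Option (List (String × String)))) : String :=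
  if tz = [] then "_none_" else
  -- seen = list(dict.fromkeys(zone of each entry))
  let seen := PySem.List.dedup (tz.map (fun pz => pvZoneB pz.2))
  -- order = known zones that occur, then leftover zones in first-appearance order
  let order := pvKnownB.filter (fun k => seen.contains k) ++
               seen.filter (fun k => !pvKnownB.contains k)
  -- one block per zone, re-scanning tz for the matching entries
  let lines := order.foldl (fun acc zone =>
    acc ++ (["- **" ++ zone ++ "**"] ++
      (tz.filter (fun pz => pvZoneB pz.2 == zone)).map
        (fun pz => "    - `" ++ pvTagB pz.1 pz.2 ++ "`"))) []
  PySem.Str.join "\n" lines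

-- ===== PRECONDITION & SPEC =====
def Spec_fmt_truth_zones_py (tz : List (String × Option (List (String × String)))) (out : String) : Prop := out = fmt_truth_zones_py_alt tz
instance (tz : List (String × Option (List (String × String)))) (out : String) : Decidable (Spec_fmt_truth_zones_py tz out) := by unfold Spec_fmt_truth_zones_py; infer_instance

-- ===== CLAIM (what is proved, stated in full; the proofs are below) =====
def Claim_equal_fmt_truth_zones_py : Prop := ∀ (tz : List (String × Option (List (String × String)))), Dom_fmt_truth_zones_py tz → Spec_fmt_truth_zones_py tz (fmt_truth_zones_py tz)

-- ===== LEMMAS AND PROOFS =====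

theorem pv_foldl_append_ite {α β : Type} (p : α → Bool) (g : α → List β) (l : List α) (acc : List β) :
    l.foldl (fun acc x => if p x then acc ++ g x else acc) acc
      = acc ++ (l.filter p).flatMap g := by
  induction l generalizing acc with
  | nil => simp
  | cons hd tl ih =>
    by_cases h : p hd <;> simp [h, ih, List.append_assoc]

theorem pv_foldl_append_ite_not {α β : Type} (p : α → Bool) (g : α → List β) (l : List α) (acc : List β) :
    l.foldl (fun acc x => if p x then acc else acc ++ g x) acc
      = acc ++ (l.filter (fun x => !p x)).flatMap g := by
  induction l generalizing acc with
  | nil => simp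
  | cons hd tl ih =>
    by_cases h : p hd <;> simp [h, ih, List.append_assoc]

-- A's bucket-building fold, seen as the standard (zone, tag) grouping fold
theorem pv_bucketsA_eq (tz : List (String × Option (List (String × String)))) :
    (tz.foldl (fun d pz =>
      let m := pz.2.getD []
      let zone := (pvGetA m "zone").getD "?"
      let expected := pvGetA m "expected"
      let note := pvGetA m "note"
      let tag := pz.1
      let tag := if (expected.getD "") ≠ "" then tag ++ " = \"" ++ expected.getD "" ++ "\"" else tag
      let tag := if (note.getD "") ≠ "" then tag ++ "  _(" ++ note.getD "" ++ ")_" else tag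
      d.modify zone [] (fun xs => xs ++ [tag])) (PySem.Dict.empty : PySem.Dict String (List String)))
    = ((tz.map (fun pz => (pvZoneB pz.2, pvTagB pz.1 pz.2))).foldl
        (fun d p => d.modify p.1 [] (fun xs => xs ++ [p.2])) PySem.Dict.empty) := by
  rw [List.foldl_map]; rfl

theorem fmt_truth_zones_py_spec' (tz : List (String × Option (List (String × String)))) :
    fmt_truth_zones_py tz = fmt_truth_zones_py_alt tz := by
  by_cases htz : tz = []
  · simp [fmt_truth_zones_py, fmt_truth_zones_py_alt, htz]
  · unfold fmt_truth_zones_py fmt_truth_zones_py_alt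
    simp only [htz, if_false]
    rw [pv_bucketsA_eq]
    set pairs := tz.map (fun pz => (pvZoneB pz.2, pvTagB pz.1 pz.2)) with hpairs
    set buckets := pairs.foldl (fun d p => d.modify p.1 [] (fun xs => xs ++ [p.2]))
      (PySem.Dict.empty : PySem.Dict String (List String)) with hbuckets
    have hkeys : buckets.keys = PySem.List.dedup (tz.map fun pz => pvZoneB pz.2) := by
      have h := PySem.Dict.keys_foldl_modify_key pairs (fun p => p.1) [] (fun _ p xs => xs ++ [p.2]) PySem.Dict.empty
      rw [hbuckets, h]
      show PySem.Set.update PySem.Dict.empty.keys (List.map (fun p => p.1) pairs) = _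
      rw [hpairs, List.map_map]
      rfl
    have hnd : buckets.keys.Nodup := by
      rw [hbuckets]
      exact PySem.Dict.nodup_keys_foldl_modify_key pairs (fun p => p.1) [] (fun _ p xs => xs ++ [p.2]) PySem.Dict.empty (by simp [PySem.Dict.empty, PySem.Dict.keys])
    have hget : ∀ z, buckets.getD z [] = (tz.filter (fun pz => pvZoneB pz.2 == z)).map (fun pz => pvTagB pz.1 pz.2) := by
      intro z
      rw [hbuckets, PySem.Dict.getD_foldl_modify_append pairs PySem.Dict.empty z, hpairs,
          List.filter_map, List.map_map]
      simp [Function.comp_def, PySem.Dict.empty, PySem.Dict.getD, PySem.Dict.get?]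
    have hitems : buckets.items = buckets.keys.map (fun k => (k, buckets.getD k [])) :=
      PySem.Dict.items_eq_map_keys buckets hnd []
    rw [pv_foldl_append_ite (fun zone => buckets.contains zone)
          (fun zone => ["- **" ++ zone ++ "**"] ++ (buckets.getD zone []).map (fun item => "    - `" ++ item ++ "`"))]
    rw [pv_foldl_append_ite_not (fun zi : String × List String => pvKnownA.contains zi.1)
          (fun zi : String × List String => ["- **" ++ zi.1 ++ "**"] ++ zi.2.map (fun item => "    - `" ++ item ++ "`"))]
    rw [PySem.List.foldl_append_eq_flatMap]
    rw [hitems, hkeys]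
    simp only [List.filter_map, List.flatMap_map, hget, List.flatMap_append, List.nil_append,
      PySem.Dict.contains_eq_decide_mem_keys, hkeys]
    have hKB : pvKnownB = pvKnownA := rfl
    simp only [hKB, List.map_map, Function.comp_def, List.contains_eq_mem]
    set seen := PySem.List.dedup (List.map (fun pz => pvZoneB pz.2) tz) with hseen
    obtain ⟨hd, tl, rfl⟩ := List.exists_cons_of_ne_nil htz
    have hz0 : pvZoneB hd.2 ∈ seen := by
      rw [hseen]
      exact (PySem.List.mem_dedup _ _).mpr (by simp)
    split
    · next hX =>
      exfalso
      rw [List.append_eq_nil_iff] at hX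
      obtain ⟨h1, h2⟩ := hX
      by_cases hk : pvZoneB hd.2 ∈ pvKnownA
      · have := List.flatMap_eq_nil_iff.mp h1 _ (List.mem_filter.mpr ⟨hk, by simp [hz0]⟩)
        simp at this
      · have := List.flatMap_eq_nil_iff.mp h2 _ (List.mem_filter.mpr ⟨hz0, by simp [hk]⟩)
        simp at this
    · rfl

-- ===== VERDICT (by name: the statement is the Claim_ definition above) =====
theorem fmt_truth_zones_py_spec : Claim_equal_fmt_truth_zones_py := by
  intro tz _
  unfold Spec_fmt_truth_zones_py
  exact fmt_truth_zones_py_spec' tz
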